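-- pv_equiv track=rewrite | github.com/abdullahgamal17/Algorithms-Assignment | Assignment.py | problem_15
-- ===== SOURCE A (Python) =====
-- def problem_15(arr):
--
--     minimum_index = len(arr)
--
--     my_Repository = set()
--     for i in reversed(range(len(arr))):
--         if arr[i] in my_Repository:
--             minimum_index = i
--         else:
--             my_Repository.add(arr[i])
--
--     return minimum_index
-- ===== SOURCE B (Python) =====
-- def problem_15(arr):
--     # Forward scan with a map of remaining occurrence counts:
--     # first index whose value still occurs later, else len(arr).
--     remaining = {}
--     for v in arr:
--         remaining[v] = remaining.get(v, 0) + 1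
--     for i, v in enumerate(arr):
--         remaining[v] -= 1
--         if remaining[v] > 0:
--             return i
--     return len(arr)
-- ===== Notes on version B (the rewrite author's own statement) =====
-- stated objective: alternative
-- what changed: Replaces A's backward scan with a seen-set by a forward scan over a precomputed dict of remaining occurrence counts, returning at the first index whose value still occurs later.
import Mathlib
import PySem

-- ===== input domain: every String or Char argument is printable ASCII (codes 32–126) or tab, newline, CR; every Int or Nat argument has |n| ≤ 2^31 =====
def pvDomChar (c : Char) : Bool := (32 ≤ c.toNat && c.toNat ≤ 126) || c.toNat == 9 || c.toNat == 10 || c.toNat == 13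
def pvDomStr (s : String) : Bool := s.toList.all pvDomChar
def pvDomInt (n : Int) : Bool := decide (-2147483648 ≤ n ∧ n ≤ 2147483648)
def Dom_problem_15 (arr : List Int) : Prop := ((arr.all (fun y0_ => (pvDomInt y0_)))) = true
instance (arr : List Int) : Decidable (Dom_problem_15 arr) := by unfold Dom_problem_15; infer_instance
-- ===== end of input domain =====

-- B replaces A's backward scan with a seen-set by a forward scan over a dict of remaining counts (alternative decomposition, same cost).

-- ===== PORT A =====
-- backward loop over reversed(range(len(arr))); arr[i] is in range, so pyGetD is exact
def problem_15 (arr : List Int) : Int :=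
  let st := ((PySem.List.pyRange 0 arr.length 1).reverse).foldl
    (fun (st : Int × PySem.Set Int) i =>
      let v := PySem.List.pyGetD arr i 0
      if st.2.contains v then (i, st.2) else (st.1, st.2.add v))
    ((arr.length : Int), PySem.Set.empty)
  st.1

-- ===== PORT B =====
-- the counting first loop of Source B
def altCount (arr : List Int) : PySem.Dict Int Int :=
  arr.foldl (fun d v => d.insert v (d.getD v 0 + 1)) PySem.Dict.empty

-- the enumerate loop of Source B: i is the current index, n = len(arr) is the final return
def altGo (n : Int) (counter : PySem.Dict Int Int) (i : Int) : List Int → Int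
  | [] => n
  | v :: rest =>
    let c := counter.getD v 0 - 1
    let counter' := counter.insert v c
    if c > 0 then i else altGo n counter' (i + 1) rest

def problem_15_alt (arr : List Int) : Int :=
  altGo (arr.length : Int) (altCount arr) 0 arr

-- ===== PRECONDITION & SPEC =====
def Spec_problem_15 (arr : List Int) (out : Int) : Prop := out = problem_15_alt arr
instance (arr : List Int) (out : Int) : Decidable (Spec_problem_15 arr out) := by unfold Spec_problem_15; infer_instance

-- ===== CLAIM (what is proved, stated in full; the proofs are below) =====
def Claim_equal_problem_15 : Prop := ∀ (arr : List Int), Dom_problem_15 arr → Spec_problem_15 arr (problem_15 arr)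

-- ===== LEMMAS AND PROOFS =====

-- first index whose value reoccurs later (length if none), as a Nat
def fd : List Int → Nat
  | [] => 0
  | v :: rest => if v ∈ rest then 0 else fd rest + 1

theorem altGo_spec (n : Int) (l : List Int) : ∀ (counter : PySem.Dict Int Int) (i : Int),
    (∀ v, counter.getD v 0 = (l.count v : Int)) →
    altGo n counter i l = if fd l = l.length then n else i + (fd l : Int) := by
  induction l with
  | nil => intro counter i h; simp [altGo, fd]
  | cons v rest ih =>
    intro counter i h
    have hv : counter.getD v 0 = ((rest.count v : Int) + 1) := by
      have := h v; simpa [List.count_cons] using this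
    rw [show altGo n counter i (v :: rest)
          = if (counter.getD v 0 - 1) > 0 then i
            else altGo n (counter.insert v (counter.getD v 0 - 1)) (i + 1) rest from rfl]
    by_cases hm : v ∈ rest
    · have hc : (counter.getD v 0 - 1) > 0 := by
        have : 0 < rest.count v := List.count_pos_iff.mpr hm
        omega
      rw [if_pos hc]
      have h0 : fd (v :: rest) = 0 := by simp [fd, hm]
      rw [h0, if_neg (by simp), Nat.cast_zero, add_zero]
    · have hc : ¬ (counter.getD v 0 - 1) > 0 := by
        have : rest.count v = 0 := List.count_eq_zero.mpr hm
        omega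
      have hrec : ∀ w, (counter.insert v (counter.getD v 0 - 1)).getD w 0 = (rest.count w : Int) := by
        intro w
        rw [PySem.Dict.getD_insert]
        by_cases hw : w = v
        · simp [hw, hv]
        · have hw' : v ≠ w := fun hh => hw hh.symm
          have := h w
          simp only [if_neg hw]
          simpa [List.count_cons, hw'] using this
      rw [if_neg hc, ih _ _ hrec]
      simp only [fd, if_neg hm, List.length_cons]
      split <;> split <;> first | rfl | omega

theorem altCount_getD (arr : List Int) (v : Int) :
    (altCount arr).getD v 0 = (arr.count v : Int) := by
  unfold altCount
  rw [PySem.Dict.getD_foldl_insert_add_one]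
  simp

-- A's backward fold (as a foldr over the index range), characterised suffix by suffix
theorem aFold_spec (arr : List Int) : ∀ (m k : Nat), k + m = arr.length →
    ((PySem.List.pyRange (k : Int) (arr.length : Int) 1).foldr
      (fun x (y : Int × PySem.Set Int) =>
        let v := PySem.List.pyGetD arr x 0
        if y.2.contains v then (x, y.2) else (y.1, y.2.add v))
      ((arr.length : Int), PySem.Set.empty)).1
      = (if fd (arr.drop k) = (arr.drop k).length then (arr.length : Int) else (k : Int) + (fd (arr.drop k) : Int))
    ∧ ∀ v, v ∈ ((PySem.List.pyRange (k : Int) (arr.length : Int) 1).foldr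
      (fun x (y : Int × PySem.Set Int) =>
        let v := PySem.List.pyGetD arr x 0
        if y.2.contains v then (x, y.2) else (y.1, y.2.add v))
      ((arr.length : Int), PySem.Set.empty)).2 ↔ v ∈ arr.drop k := by
  intro m
  induction m with
  | zero =>
    intro k hk
    have h1 : (arr.length : Int) ≤ (k : Int) := by omega
    rw [PySem.List.pyRange_one_eq_nil h1]
    have hd : arr.drop k = [] := List.drop_eq_nil_of_le (by omega)
    simp [hd, fd, PySem.Set.empty]
  | succ m ih =>
    intro k hk
    have hkn : (k : Int) < (arr.length : Int) := by omega
    have hkl : k < arr.length := by omega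
    rw [PySem.List.pyRange_one_cons hkn]
    have hcast : ((k : Int) + 1) = (((k + 1 : Nat)) : Int) := by push_cast; ring
    rw [List.foldr_cons, hcast]
    obtain ⟨ih1, ih2⟩ := ih (k + 1) (by omega)
    have hget : PySem.List.pyGetD arr (k : Int) 0 = arr[k] := by
      rw [PySem.List.pyGetD_natCast, List.getD_eq_getElem _ _ hkl]
    have hdrop : arr.drop k = arr[k] :: arr.drop (k + 1) := List.drop_eq_getElem_cons hkl
    simp only [hget]
    by_cases hm : arr[k] ∈ arr.drop (k + 1)
    · rw [if_pos (by simpa [PySem.Set.contains] using (ih2 _).mpr hm)]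
      constructor
      · show (k : Int) = _
        have hfd0 : fd (arr.drop k) = 0 := by rw [hdrop]; simp [fd, hm]
        have hne : ¬ (fd (arr.drop k) = (arr.drop k).length) := by
          rw [hfd0, hdrop]; simp; omega
        rw [if_neg hne, hfd0, Nat.cast_zero, add_zero]
      · intro v
        show v ∈ _ ↔ _
        rw [hdrop]
        simp only [List.mem_cons]
        constructor
        · intro h; exact Or.inr ((ih2 v).mp h)
        · rintro (h | h)
          · exact (ih2 v).mpr (h ▸ hm)
          · exact (ih2 v).mpr h
    · have hnotmem : arr[k] ∉ ((PySem.List.pyRange (((k + 1 : Nat)) : Int) (arr.length : Int) 1).foldr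
          (fun x (y : Int × PySem.Set Int) =>
            let v := PySem.List.pyGetD arr x 0
            if y.2.contains v then (x, y.2) else (y.1, y.2.add v))
          ((arr.length : Int), PySem.Set.empty)).2 := fun h => hm ((ih2 _).mp h)
      rw [if_neg (by simpa [PySem.Set.contains] using hnotmem)]
      have hfd : fd (arr.drop k) = fd (arr.drop (k + 1)) + 1 := by
        rw [hdrop]; simp [fd, hm]
      have hlen : (arr.drop k).length = (arr.drop (k + 1)).length + 1 := by
        rw [hdrop]; simp; omega
      constructor
      · show _ = _
        rw [ih1, hfd, hlen]
        split <;> split <;> first | rfl | omega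
      · intro v
        show v ∈ PySem.Set.add _ arr[k] ↔ _
        rw [hdrop]
        simp only [List.mem_cons, PySem.Set.mem_add, ih2]
        tauto

theorem problem_15_eq (arr : List Int) :
    problem_15 arr = if fd arr = arr.length then (arr.length : Int) else (fd arr : Int) := by
  unfold problem_15
  rw [List.foldl_reverse]
  have h := (aFold_spec arr arr.length 0 (by omega)).1
  simp only [Nat.cast_zero, List.drop_zero, zero_add] at h
  simpa using h

theorem problem_15_alt_eq (arr : List Int) :
    problem_15_alt arr = if fd arr = arr.length then (arr.length : Int) else (fd arr : Int) := by
  unfold problem_15_alt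
  rw [altGo_spec _ _ _ _ (fun v => altCount_getD arr v)]
  simp

-- ===== VERDICT (by name: the statement is the Claim_ definition above) =====
theorem problem_15_spec : Claim_equal_problem_15 := by
  intro arr _
  unfold Spec_problem_15
  rw [problem_15_eq, problem_15_alt_eq]
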